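-- pv_equiv track=rewrite | github.com/yannickloth/W33-Theory | legacy/one_off_root/_explore29b.py | liouville
-- ===== SOURCE A (Python) =====
-- def liouville(n):
--     if n == 1: return 1
--     d = 2
--     count = 0
--     while d*d <= n:
--         while n % d == 0:
--             count += 1
--             n //= d
--         d += 1
--     if n > 1: count += 1
--     return (-1)**count
-- ===== SOURCE B (Python) =====
-- def liouville(n):
--     # Recursive via complete multiplicativity: lambda(1)=1, lambda(n) = -lambda(n/p)
--     # for the smallest prime factor p of n.
--     d = 2
--     while d * d <= n:
--         if n % d == 0:
--             return -liouville(n // d)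
--         d += 1
--     return -1 if n > 1 else 1
-- ===== Notes on version B (the rewrite author's own statement) =====
-- stated objective: alternative
-- what changed: Replaces the iterative nested-while factor-counting-plus-parity loop by a recursion on complete multiplicativity: find the smallest divisor d and return -liouville(n//d), with base case -1/1.
import Mathlib
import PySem

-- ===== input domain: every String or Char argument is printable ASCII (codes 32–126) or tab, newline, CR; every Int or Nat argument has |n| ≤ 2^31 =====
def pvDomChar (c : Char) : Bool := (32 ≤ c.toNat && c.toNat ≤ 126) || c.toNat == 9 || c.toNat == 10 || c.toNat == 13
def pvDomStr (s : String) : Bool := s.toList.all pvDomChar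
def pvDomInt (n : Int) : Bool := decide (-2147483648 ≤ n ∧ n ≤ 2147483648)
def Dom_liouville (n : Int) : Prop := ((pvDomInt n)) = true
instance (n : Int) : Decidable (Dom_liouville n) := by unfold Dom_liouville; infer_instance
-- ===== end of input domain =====

-- B replaces A's iterative count-all-prime-factors-then-take-parity by a recursion on
-- complete multiplicativity (peel one smallest factor per call); alternative, not faster.

-- floordiv by d ≥ 2 strictly shrinks a positive n (cited by the termination proofs below)
theorem pv_ediv_lt (n d : Int) (hn : 0 < n) (hd : 2 ≤ d) : n / d < n := by
  rw [Int.ediv_lt_iff_lt_mul (by omega)]; nlinarith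

-- ===== PORT A =====
-- inner `while n % d == 0: count += 1; n //= d`; the 0 < n ∧ 2 ≤ d guard only makes the
-- recursion total (in A the loop is only ever reached with 2 ≤ d and d*d ≤ n, so 0 < n)
def stripLoop (d n : Int) (count : Nat) : Int × Nat :=
  if h : 0 < n ∧ 2 ≤ d ∧ PySem.Int.mod n d = 0 then
    stripLoop d (PySem.Int.floordiv n d) (count + 1)
  else (n, count)
termination_by n.toNat
decreasing_by
  have h1 : PySem.Int.floordiv n d = n / d := PySem.Int.floordiv_eq_ediv_of_pos (by omega)
  have h2 : n / d < n := pv_ediv_lt n d h.1 h.2.1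
  omega

-- the stripped value never grows (cited by outerLoop's termination proof)
theorem stripLoop_fst_le (d n : Int) (c : Nat) : (stripLoop d n c).1 ≤ n := by
  fun_induction stripLoop d n c with
  | case1 n c h ih =>
    have h1 : PySem.Int.floordiv n d = n / d := PySem.Int.floordiv_eq_ediv_of_pos (by omega)
    have h2 : n / d < n := pv_ediv_lt n d h.1 h.2.1
    omega
  | case2 n c h => simp

-- outer `while d*d <= n` loop; 2 ≤ d again only a totality guard (d starts at 2 and grows)
def outerLoop (d n : Int) (count : Nat) : Int :=
  if h : 2 ≤ d ∧ d * d ≤ n then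
    outerLoop (d + 1) (stripLoop d n count).1 (stripLoop d n count).2
  else
    (-1 : Int) ^ (if 1 < n then count + 1 else count)
termination_by (n + 1 - d).toNat
decreasing_by
  have h1 := stripLoop_fst_le d n count
  have h2 : d ≤ n := le_trans (le_mul_of_one_le_left (by omega) (by omega)) h.2
  omega

def liouville (n : Int) : Int :=
  if n = 1 then 1 else outerLoop 2 n 0

-- ===== PORT B =====
-- Source B's `while d*d <= n: if n % d == 0: return -liouville(n//d); d += 1`, the recursive
-- self-call `liouville(n//d)` being altLoop 2 (n//d); 2 ≤ d is again only a totality guard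
def altLoop (d n : Int) : Int :=
  if h : 2 ≤ d ∧ d * d ≤ n then
    if PySem.Int.mod n d = 0 then - altLoop 2 (PySem.Int.floordiv n d)
    else altLoop (d + 1) n
  else if 1 < n then -1 else 1
termination_by (n.toNat, (n + 1 - d).toNat)
decreasing_by
  · apply Prod.Lex.left
    have hn : (0:Int) < n := by nlinarith [h.1, h.2]
    have h1 : PySem.Int.floordiv n d = n / d := PySem.Int.floordiv_eq_ediv_of_pos (by omega)
    have h2 : n / d < n := pv_ediv_lt n d hn (by omega)
    omega
  · apply Prod.Lex.right
    have h2 : d ≤ n := le_trans (le_mul_of_one_le_left (by omega) (by omega)) h.2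
    omega

def liouville_alt (n : Int) : Int := altLoop 2 n

-- ===== PRECONDITION & SPEC =====
def Spec_liouville (n : Int) (out : Int) : Prop := out = liouville_alt n
instance (n : Int) (out : Int) : Decidable (Spec_liouville n out) := by unfold Spec_liouville; infer_instance

-- ===== CLAIM (what is proved, stated in full; the proofs are below) =====
def Claim_equal_liouville : Prop := ∀ (n : Int), Dom_liouville n → Spec_liouville n (liouville n)

-- ===== LEMMAS AND PROOFS =====

theorem pv_floordiv_pos (d n : Int) (hd : 2 ≤ d) :
    PySem.Int.floordiv n d = n / d := PySem.Int.floordiv_eq_ediv_of_pos (by omega)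

-- the inner while loop extracts the full power of d: stripLoop d (d^k*m) c = (m, c+k)
theorem strip_char (d : Int) (hd : 2 ≤ d) (n : Int) (hn : 0 < n) :
    ∃ (k : Nat) (m : Int), (∀ c, stripLoop d n c = (m, c + k)) ∧
      n = d ^ k * m ∧ ¬ d ∣ m ∧ 0 < m ∧ (d ∣ n → 1 ≤ k) := by
  by_cases hdvd : d ∣ n
  · obtain ⟨m', rfl⟩ := hdvd
    have hm' : 0 < m' := by nlinarith
    have hfd : PySem.Int.floordiv (d * m') d = m' := by
      rw [pv_floordiv_pos d _ hd, Int.mul_ediv_cancel_left _ (by omega)]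
    have hlt : m'.toNat < (d * m').toNat := by
      have : m' < d * m' := by nlinarith
      omega
    obtain ⟨k, m, hs, hf, hdm, hmpos, _⟩ := strip_char d hd m' hm'
    refine ⟨k + 1, m, ?_, ?_, hdm, hmpos, fun _ => by omega⟩
    · intro c
      rw [stripLoop]
      have hmod : PySem.Int.mod (d * m') d = 0 :=
        (PySem.Int.mod_eq_zero_iff_dvd _ _).2 ⟨m', rfl⟩
      rw [dif_pos ⟨hn, hd, hmod⟩, hfd, hs (c + 1)]
      congr 1
      omega
    · rw [hf]; ring
  · refine ⟨0, n, ?_, by ring, hdvd, hn, fun h => absurd h hdvd⟩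
    intro c
    rw [stripLoop,
      dif_neg (fun h => hdvd ((PySem.Int.mod_eq_zero_iff_dvd _ _).1 h.2.2))]
    simp
termination_by n.toNat

-- B's loop skips every non-divisor: altLoop d1 n = altLoop d2 n when nothing in [d1,d2) divides n
theorem skip_lemma (n d1 d2 : Int) (h1 : 2 ≤ d1) (h12 : d1 ≤ d2)
    (hinv : ∀ e, d1 ≤ e → e < d2 → ¬ e ∣ n) : altLoop d1 n = altLoop d2 n := by
  rcases eq_or_lt_of_le h12 with rfl | hlt
  · rfl
  · have hnd : ¬ d1 ∣ n := hinv d1 le_rfl hlt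
    by_cases hg : d1 * d1 ≤ n
    · have step : altLoop d1 n = altLoop (d1 + 1) n := by
        rw [altLoop, dif_pos ⟨h1, hg⟩,
          if_neg (fun hm => hnd ((PySem.Int.mod_eq_zero_iff_dvd _ _).1 hm))]
      rw [step]
      exact skip_lemma n (d1 + 1) d2 (by omega) (by omega) (fun e he1 he2 => hinv e (by omega) he2)
    · have hg2 : ¬ d2 * d2 ≤ n := by nlinarith
      rw [altLoop, dif_neg (fun h => hg h.2), altLoop, dif_neg (fun h => hg2 h.2)]
termination_by (d2 - d1).toNat
decreasing_by omega

-- peeling d one factor at a time: altLoop d (d^k*m) = (-1)^k * altLoop (d+1) m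
theorem peel (d : Int) (hd : 2 ≤ d) (k : Nat) (m : Int) (hm : 0 < m) (hdm : ¬ d ∣ m) :
    (∀ e, 2 ≤ e → e < d → ¬ e ∣ d ^ k * m) →
      altLoop d (d ^ k * m) = (-1) ^ k * altLoop (d + 1) m := by
  induction k with
  | zero =>
    intro _
    simp only [pow_zero, one_mul]
    by_cases hg : d * d ≤ m
    · rw [altLoop, dif_pos ⟨hd, hg⟩,
        if_neg (fun hmod => hdm ((PySem.Int.mod_eq_zero_iff_dvd _ _).1 hmod))]
    · have hg2 : ¬ (d + 1) * (d + 1) ≤ m := by nlinarith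
      rw [altLoop, dif_neg (fun h => hg h.2), altLoop, dif_neg (fun h => hg2 h.2)]
  | succ k ih =>
    intro hinv
    have hdpow : (0:Int) < d ^ k := pow_pos (by omega) k
    have hx : (0:Int) < d ^ (k + 1) * m := by positivity
    by_cases hg : d * d ≤ d ^ (k + 1) * m
    · have hdvd : d ∣ d ^ (k + 1) * m := ⟨d ^ k * m, by ring⟩
      have hfd : PySem.Int.floordiv (d ^ (k + 1) * m) d = d ^ k * m := by
        rw [pv_floordiv_pos d _ hd, show d ^ (k + 1) * m = d * (d ^ k * m) by ring,
          Int.mul_ediv_cancel_left _ (by omega)]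
      rw [altLoop, dif_pos ⟨hd, hg⟩,
        if_pos ((PySem.Int.mod_eq_zero_iff_dvd _ _).2 hdvd), hfd]
      have hinv' : ∀ e, 2 ≤ e → e < d → ¬ e ∣ d ^ k * m := by
        intro e he1 he2 hediv
        exact hinv e he1 he2 (hediv.trans ⟨d, by ring⟩)
      rw [skip_lemma (d ^ k * m) 2 d (by omega) hd (fun e he1 he2 => hinv' e he1 he2),
        ih hinv']
      ring
    · -- then k = 0 and m = 1, i.e. the remaining argument is d itself
      rw [pow_succ] at hg hinv ⊢
      have hk0 : k = 0 := by
        by_contra hk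
        have h1 : d ≤ d ^ k := le_self_pow₀ (by omega) hk
        have ha : d * d ≤ d ^ k * d := by nlinarith
        have hb : d ^ k * d * 1 ≤ d ^ k * d * m :=
          mul_le_mul_of_nonneg_left (by omega) (by positivity)
        nlinarith
      subst hk0
      rw [pow_zero, one_mul] at hg hinv ⊢
      have hm1 : m = 1 := by
        by_contra hm1
        have h2m : 2 ≤ m := by omega
        have hmd : m < d := by nlinarith
        exact hinv m h2m hmd ⟨d, by ring⟩
      subst hm1
      rw [mul_one] at hg ⊢
      rw [altLoop, dif_neg (fun h => hg h.2), if_pos (by omega), altLoop,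
        dif_neg (by intro h; nlinarith [h.2]), if_neg (by omega)]
      norm_num

-- the main invariant lemma: with all factors below d already removed, A's outer loop
-- (with pending count c) agrees with B's recursion up to the sign (-1)^c
theorem main_lemma (n d : Int) (hd : 2 ≤ d) (hn : 0 < n)
    (hinv : ∀ e, 2 ≤ e → e < d → ¬ e ∣ n) (c : Nat) :
    outerLoop d n c = (-1) ^ c * altLoop d n := by
  by_cases hg : d * d ≤ n
  · obtain ⟨k, m, hs, hf, hdm, hmpos, hk⟩ := strip_char d hd n hn
    have hinv' : ∀ e, 2 ≤ e → e < d + 1 → ¬ e ∣ m := by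
      intro e he1 he2 hediv
      rcases lt_or_eq_of_le (show e ≤ d by omega) with h | h
      · exact hinv e he1 h (hediv.trans ⟨d ^ k, by rw [hf]; ring⟩)
      · exact hdm (h ▸ hediv)
    have hA : outerLoop d n c = outerLoop (d + 1) m (c + k) := by
      rw [outerLoop, dif_pos ⟨hd, hg⟩, hs c]
    by_cases hdvd : d ∣ n
    · have hk1 : 1 ≤ k := hk hdvd
      obtain ⟨j, rfl⟩ : ∃ j, k = j + 1 := ⟨k - 1, by omega⟩
      have hmlt : m.toNat < n.toNat := by
        have h1 : d ≤ d ^ (j + 1) := le_self_pow₀ (by omega) (by omega)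
        have h2 : d * m ≤ d ^ (j + 1) * m := mul_le_mul_of_nonneg_right h1 (le_of_lt hmpos)
        have h3 : 2 * m ≤ d * m := by nlinarith
        have h4 : m < n := by rw [hf]; linarith
        omega
      have hfd : PySem.Int.floordiv n d = d ^ j * m := by
        rw [pv_floordiv_pos d n hd, hf, pow_succ', mul_assoc,
          Int.mul_ediv_cancel_left _ (by omega)]
      have hinvp : ∀ e, 2 ≤ e → e < d → ¬ e ∣ d ^ j * m := by
        intro e he1 he2 hediv
        exact hinv e he1 he2 (hediv.trans ⟨d, by rw [hf, pow_succ']; ring⟩)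
      have hB : altLoop d n = (-1) ^ (j + 1) * altLoop (d + 1) m := by
        rw [altLoop, dif_pos ⟨hd, hg⟩,
          if_pos ((PySem.Int.mod_eq_zero_iff_dvd _ _).2 hdvd), hfd,
          skip_lemma (d ^ j * m) 2 d (by omega) hd hinvp,
          peel d hd j m hmpos hdm hinvp]
        ring
      rw [hA, main_lemma m (d + 1) (by omega) hmpos hinv' (c + (j + 1)), hB]
      ring
    · have hk0 : k = 0 := by
        by_contra hne
        exact hdvd ⟨d ^ (k - 1) * m, by
          rw [hf, show d ^ k = d * d ^ (k - 1) by rw [← pow_succ']; congr 1; omega]; ring⟩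
      subst hk0
      have hmn : m = n := by rw [hf]; ring
      rw [hmn] at hA hinv'
      have hB : altLoop d n = altLoop (d + 1) n := by
        rw [altLoop, dif_pos ⟨hd, hg⟩,
          if_neg (fun hmod => hdvd ((PySem.Int.mod_eq_zero_iff_dvd _ _).1 hmod))]
      rw [hA, hB, main_lemma n (d + 1) (by omega) hn hinv' (c + 0)]
      norm_num
  · rw [outerLoop, dif_neg (fun h => hg h.2), altLoop, dif_neg (fun h => hg h.2)]
    by_cases h1 : 1 < n
    · rw [if_pos h1, if_pos h1, pow_succ]
    · rw [if_neg h1, if_neg h1, mul_one]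
termination_by (n.toNat, (n + 1 - d).toNat)
decreasing_by
  · exact Prod.Lex.left _ _ hmlt
  · apply Prod.Lex.right
    have h2 : d ≤ n := le_trans (le_mul_of_one_le_left (by omega) (by omega)) hg
    omega

-- ===== VERDICT (by name: the statement is the Claim_ definition above) =====
theorem liouville_spec : Claim_equal_liouville := by
  intro n _
  unfold Spec_liouville liouville liouville_alt
  by_cases h1 : n = 1
  · subst h1
    rw [if_pos rfl, altLoop]
    norm_num
  · rw [if_neg h1]
    by_cases hp : 0 < n
    · have := main_lemma n 2 le_rfl hp (fun e he1 he2 _ => by omega) 0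
      simpa using this
    · rw [outerLoop, dif_neg (by intro h; omega), altLoop, dif_neg (by intro h; omega),
        if_neg (by omega), if_neg (by omega), pow_zero]
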